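-- pv_equiv track=rewrite | github.com/Amakata/sekimore-gw | src/web_ui/app.py | get_current_rule
-- ===== SOURCE A (Python) =====
-- def get_current_rule(domain: str, config: dict) -> str:
--     """ドメインの現在のルールを判定.
--
--     Args:
--         domain: ドメイン名
--         config: 設定辞書
--
--     Returns:
--         現在のルール: "allowed", "blocked_explicit", "blocked_default"
--     """
--     domain_lower = domain.lower().rstrip(".")
--     allow_domains = config.get("allow_domains", [])
--     block_domains = config.get("block_domains", [])
--
--     # ブロックリストチェック（優先）
--     for blocked in block_domains:
--         # 完全一致
--         if blocked == domain_lower: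
--             return "blocked_explicit"
--         # ワイルドカード（.example.com形式）
--         if blocked.startswith(".") and (
--             domain_lower.endswith(blocked) or domain_lower.endswith(blocked[1:])
--         ):
--             return "blocked_explicit"
--
--     # 許可リストチェック
--     for allowed in allow_domains:
--         # 完全一致
--         if allowed == domain_lower:
--             return "allowed"
--         # ワイルドカード（.example.com形式）
--         if allowed.startswith(".") and (
--             domain_lower.endswith(allowed) or domain_lower.endswith(allowed[1:])
--         ):
--             return "allowed"
--
--     # どちらにも該当しない場合（デフォルト拒否）
--     return "blocked_default"
-- ===== SOURCE B (Python) =====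
-- def get_current_rule(domain: str, config: dict) -> str:
--     """Classify domain by set lookup: index each rule list as a set, and for the
--     wildcard test probe only the one '.'-suffix of the domain per entry length."""
--     d = domain.lower().rstrip(".")
--     n = len(d)
--     for rule, key in (("blocked_explicit", "block_domains"), ("allowed", "allow_domains")):
--         entries = set(config.get(key, []))
--         if d in entries:
--             return rule
--         suffix_lens = {len(e) - 1 for e in entries if e.startswith(".")}
--         if any(k <= n and "." + d[n - k:] in entries for k in suffix_lens):
--             return rule
--     return "blocked_default"
-- ===== Notes on version B (the rewrite author's own statement) =====
-- stated objective: alternative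
-- what changed: B indexes each rule list once as a set plus the set of wildcard-entry lengths, then decides by set lookups (the domain itself, and one '.'-suffix probe per occurring length) instead of A's per-entry exact/startswith/endswith scan.
import Mathlib
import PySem

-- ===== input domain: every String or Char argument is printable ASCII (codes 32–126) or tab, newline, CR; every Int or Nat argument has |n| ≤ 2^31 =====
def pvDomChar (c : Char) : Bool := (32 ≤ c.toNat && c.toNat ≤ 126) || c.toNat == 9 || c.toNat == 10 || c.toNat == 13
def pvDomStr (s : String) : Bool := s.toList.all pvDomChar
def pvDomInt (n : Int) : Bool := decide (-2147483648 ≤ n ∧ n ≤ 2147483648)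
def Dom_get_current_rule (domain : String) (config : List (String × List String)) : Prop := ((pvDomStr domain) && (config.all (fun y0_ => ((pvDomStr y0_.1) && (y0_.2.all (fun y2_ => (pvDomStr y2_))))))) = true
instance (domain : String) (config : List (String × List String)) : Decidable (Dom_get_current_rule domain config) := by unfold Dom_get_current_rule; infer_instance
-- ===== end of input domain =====

-- B computes the set of all match-keys of the domain once and classifies entries by
-- set membership; A scans each entry with an exact/startswith/endswith predicate.
-- Return-value equivalence is proved for all inputs; neither program mutates its arguments.

-- ===== PORT A =====

-- s.rstrip(".") ported by hand (PySem has no rstrip-with-chars): drop trailing '.' characters; exact.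
def pyRstripDots (l : List Char) : List Char := (l.reverse.dropWhile (· == '.')).reverse

-- the body of A's (identical) block/allow loops: early-return scan over the entries
def pvScanA (dl : List Char) : List String → Bool
  | [] => false
  | e :: rest =>
    if e.toList == dl then true
    else if PySem.Chars.startswith e.toList ['.'] &&
            (PySem.Chars.endswith dl e.toList ||
             PySem.Chars.endswith dl (PySem.List.slice e.toList (some 1) none)) then true
    else pvScanA dl rest

def get_current_rule (domain : String) (config : List (String × List String)) : String :=
  let dl := pyRstripDots (PySem.Chars.lower domain.toList)
  let d := PySem.Dict.mk config
  let allow_domains := d.getD "allow_domains" []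
  let block_domains := d.getD "block_domains" []
  if pvScanA dl block_domains then "blocked_explicit"
  else if pvScanA dl allow_domains then "allowed"
  else "blocked_default"

-- ===== PORT B =====

-- one rule list of B: entries as a set, plus the set of wildcard-entry lengths;
-- probe d itself and the single '.'-suffix of d per occurring length
def pvMatchB (d : List Char) (raw : List String) : Bool :=
  let entries := PySem.Set.ofList (raw.map String.toList)
  entries.contains d ||
  (let suffix_lens := PySem.Set.ofList
      ((entries.filter (fun e => PySem.Chars.startswith e ['.'])).map (fun e => e.length - 1))
   suffix_lens.any (fun k => decide (k ≤ d.length) && entries.contains ('.' :: d.drop (d.length - k))))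

def get_current_rule_alt (domain : String) (config : List (String × List String)) : String :=
  let d := pyRstripDots (PySem.Chars.lower domain.toList)
  let cfg := PySem.Dict.mk config
  if pvMatchB d (cfg.getD "block_domains" []) then "blocked_explicit"
  else if pvMatchB d (cfg.getD "allow_domains" []) then "allowed"
  else "blocked_default"

-- ===== PRECONDITION & SPEC =====
def Spec_get_current_rule (domain : String) (config : List (String × List String)) (out : String) : Prop := out = get_current_rule_alt domain config
instance (domain : String) (config : List (String × List String)) (out : String) : Decidable (Spec_get_current_rule domain config out) := by unfold Spec_get_current_rule; infer_instance

-- ===== CLAIM (what is proved, stated in full; the proofs are below) =====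
def Claim_equal_get_current_rule : Prop := ∀ (domain : String) (config : List (String × List String)), Dom_get_current_rule domain config → Spec_get_current_rule domain config (get_current_rule domain config)

-- ===== LEMMAS AND PROOFS =====

-- A's per-entry predicate
def pvPredA (dl e : List Char) : Bool :=
  e == dl ||
  (PySem.Chars.startswith e ['.'] &&
   (PySem.Chars.endswith dl e ||
    PySem.Chars.endswith dl (PySem.List.slice e (some 1) none)))

theorem pvScanA_eq_any (dl : List Char) (l : List String) :
    pvScanA dl l = l.any (fun e => pvPredA dl e.toList) := by
  induction l with
  | nil => rfl
  | cons e rest ih =>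
    simp only [pvScanA, List.any_cons, pvPredA, ih]
    split_ifs with h1 h2
    · simp [h1]
    · simp [h2]
    · simp
      rintro (h | h)
      · exact absurd h (by simpa using h1)
      · exact absurd h (by simpa using h2)

theorem pvPredA_iff (dl e : List Char) :
    pvPredA dl e = true ↔ (e = dl ∨ ∃ t, e = '.' :: t ∧ t <:+ dl) := by
  unfold pvPredA
  simp only [Bool.or_eq_true, Bool.and_eq_true, beq_iff_eq]
  constructor
  · rintro (rfl | ⟨hdot, hend⟩)
    · exact Or.inl rfl
    · obtain ⟨t, rfl⟩ : ∃ t, e = '.' :: t := by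
        rcases (PySem.Chars.startswith_iff e ['.']).1 hdot with ⟨r, hr⟩
        exact ⟨r, hr.symm⟩
      refine Or.inr ⟨t, rfl, ?_⟩
      have hsl : PySem.List.slice ('.' :: t) (some 1) none = t := by
        simp [PySem.List.slice]
      rcases hend with h | h
      · exact List.IsSuffix.trans ⟨['.'], rfl⟩ ((PySem.Chars.endswith_iff _ _).1 h)
      · rw [hsl] at h
        exact (PySem.Chars.endswith_iff _ _).1 h
  · rintro (rfl | ⟨t, rfl, hsuf⟩)
    · exact Or.inl rfl
    · refine Or.inr ⟨(PySem.Chars.startswith_iff _ _).2 ⟨t, rfl⟩, ?_⟩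
      have hsl : PySem.List.slice ('.' :: t) (some 1) none = t := by
        simp [PySem.List.slice]
      rw [hsl]
      exact Or.inr ((PySem.Chars.endswith_iff _ _).2 hsuf)

def pvMatchProp (dl : List Char) (l : List String) : Prop :=
  ∃ e ∈ l, e.toList = dl ∨ ∃ t, e.toList = '.' :: t ∧ t <:+ dl

theorem pvAnyA_iff (dl : List Char) (l : List String) :
    l.any (fun e => pvPredA dl e.toList) = true ↔ pvMatchProp dl l := by
  simp only [List.any_eq_true, pvMatchProp]
  constructor <;> rintro ⟨e, he, h⟩
  · exact ⟨e, he, (pvPredA_iff dl e.toList).1 h⟩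
  · exact ⟨e, he, (pvPredA_iff dl e.toList).2 h⟩

theorem pv_drop_of_suffix (dl t : List Char) (h : t <:+ dl) :
    dl.drop (dl.length - t.length) = t := by
  rcases h with ⟨r, rfl⟩
  simp

theorem pvMatchB_iff (dl : List Char) (l : List String) :
    pvMatchB dl l = true ↔ pvMatchProp dl l := by
  unfold pvMatchB pvMatchProp
  simp only [Bool.or_eq_true, List.any_eq_true, Bool.and_eq_true, decide_eq_true_eq]
  constructor
  · rintro (hd | ⟨k, hk, hkle, hcand⟩)
    · have hm := (PySem.Set.contains_iff _ _).1 hd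
      rw [PySem.Set.mem_ofList] at hm
      rcases List.mem_map.1 hm with ⟨e, he, heq⟩
      exact ⟨e, he, Or.inl heq⟩
    · have hm := (PySem.Set.contains_iff _ _).1 hcand
      rw [PySem.Set.mem_ofList] at hm
      rcases List.mem_map.1 hm with ⟨e, he, heq⟩
      exact ⟨e, he, Or.inr ⟨dl.drop (dl.length - k), heq, List.drop_suffix _ _⟩⟩
  · rintro ⟨e, he, heq | ⟨t, het, hsuf⟩⟩
    · exact Or.inl ((PySem.Set.contains_iff _ _).2
        ((PySem.Set.mem_ofList _ _).2 (List.mem_map.2 ⟨e, he, heq⟩)))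
    · refine Or.inr ⟨t.length, ?_, List.IsSuffix.length_le hsuf, ?_⟩
      · rw [PySem.Set.mem_ofList]
        apply List.mem_map.2
        refine ⟨e.toList, List.mem_filter.2 ⟨?_, ?_⟩, ?_⟩
        · exact (PySem.Set.mem_ofList _ _).2 (List.mem_map.2 ⟨e, he, rfl⟩)
        · exact (PySem.Chars.startswith_iff _ _).2 ⟨t, het.symm ▸ rfl⟩
        · rw [het]; simp
      · rw [pv_drop_of_suffix dl t hsuf]
        exact (PySem.Set.contains_iff _ _).2
          ((PySem.Set.mem_ofList _ _).2 (List.mem_map.2 ⟨e, he, het⟩))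

theorem pvMatchB_eq_scanA (dl : List Char) (l : List String) :
    pvMatchB dl l = pvScanA dl l := by
  rw [pvScanA_eq_any]
  cases hp : (l.any (fun e => pvPredA dl e.toList))
  · cases hb : pvMatchB dl l
    · rfl
    · have := (pvAnyA_iff dl l).2 ((pvMatchB_iff dl l).1 hb)
      rw [hp] at this
      exact absurd this Bool.false_ne_true
  · exact (pvMatchB_iff dl l).2 ((pvAnyA_iff dl l).1 hp)

-- ===== VERDICT (by name: the statement is the Claim_ definition above) =====
theorem get_current_rule_spec : Claim_equal_get_current_rule := by
  intro domain config _
  unfold Spec_get_current_rule get_current_rule get_current_rule_alt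
  simp only [pvMatchB_eq_scanA]
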